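-- pv_equiv track=rewrite | github.com/Shardyne/CDMOproject | SMT_try/python_files/approaches/offline.py | build_solution_table
-- ===== SOURCE A (Python) =====
-- def build_solution_table(Per, Home, N, W, P):
--     """Return P×W with 1-based team IDs [home, away], using Per/Home only."""
--     sol = [[None for _ in range(W)] for _ in range(P)]
--     # bucket teams by (w,p)
--     for w in range(W):
--         buckets = {p: [] for p in range(1, P+1)}
--         for t in range(N):
--             p = Per[t][w]
--             buckets[p].append(t)
--         for p in range(1, P+1):
--             teams = buckets[p]
--             if len(teams) != 2:
--                 raise ValueError(f"Week {w}, period {p} has {len(teams)} teams (expected 2).")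
--             a, b = teams
--             ha, hb = Home[a][w], Home[b][w]
--             if ha and not hb:
--                 sol[p-1][w] = [a+1, b+1]
--             elif hb and not ha:
--                 sol[p-1][w] = [b+1, a+1]
--             else:
--                 # fallback (shouldn't happen if XOR is enforced)
--                 sol[p-1][w] = [a+1, b+1]
--     return sol
-- ===== SOURCE B (Python) =====
-- def build_solution_table(Per, Home, N, W, P):
--     """Return P×W with 1-based team IDs [home, away], using Per/Home only."""
--     def cell(w, p):
--         teams = [t for t in range(N) if Per[t][w] == p]
--         if len(teams) != 2:
--             raise ValueError(f"Week {w}, period {p} has {len(teams)} teams (expected 2).")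
--         a, b = teams
--         if Home[b][w] and not Home[a][w]:
--             return [b + 1, a + 1]
--         return [a + 1, b + 1]
--     return [[cell(w, p) for w in range(W)] for p in range(1, P + 1)]
-- ===== Notes on version B (the rewrite author's own statement) =====
-- stated objective: simpler
-- what changed: Replaces the mutable P×W table plus per-week bucket dict with a direct nested comprehension that builds each cell (p,w) by scanning the teams, and collapses the three-way home/away branch into one two-way test.
import Mathlib
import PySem

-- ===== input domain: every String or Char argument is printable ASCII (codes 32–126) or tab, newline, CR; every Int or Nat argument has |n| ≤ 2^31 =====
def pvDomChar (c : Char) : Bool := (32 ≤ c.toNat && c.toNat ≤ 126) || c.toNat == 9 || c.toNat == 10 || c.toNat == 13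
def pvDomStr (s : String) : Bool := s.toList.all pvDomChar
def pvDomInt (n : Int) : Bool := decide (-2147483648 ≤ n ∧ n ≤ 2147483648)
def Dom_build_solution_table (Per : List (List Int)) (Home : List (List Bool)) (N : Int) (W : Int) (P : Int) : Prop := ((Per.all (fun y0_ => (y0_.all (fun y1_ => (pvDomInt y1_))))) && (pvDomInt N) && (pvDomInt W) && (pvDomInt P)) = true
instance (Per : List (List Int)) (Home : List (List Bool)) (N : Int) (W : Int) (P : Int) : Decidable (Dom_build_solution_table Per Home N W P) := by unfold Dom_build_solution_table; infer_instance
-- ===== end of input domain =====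

-- B replaces A's mutable table + per-week bucket dict with a direct nested comprehension
-- building each cell by scanning the teams (simpler decomposition, same results).


-- ===== PORT A =====
-- Per[t][w] / Home[t][w] below are ported as (Per.getD t.toNat []).getD w.toNat _ :
-- the indices are nonnegative loop counters and inside Pre_ they are in range, so the
-- getD defaults are exact there.
-- sol[p-1][w] = v  (functional update; indices nonnegative on the loop ranges)
def pvSetCell (sol : List (List (List Int))) (p w : Int) (v : List Int) : List (List (List Int)) :=
  PySem.List.pySetD sol (p - 1) (PySem.List.pySetD (PySem.List.pyGetD sol (p - 1) []) w v)

def build_solution_table (Per : List (List Int)) (Home : List (List Bool)) (N : Int) (W : Int) (P : Int) : List (List (List Int)) :=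
  -- sol = [[None]*W for _ in range(P)]  (None modelled as [], never observable inside Pre_)
  let sol0 := (PySem.List.pyRange 0 P 1).map (fun _ => (PySem.List.pyRange 0 W 1).map (fun _ => ([] : List Int)))
  (PySem.List.pyRange 0 W 1).foldl (fun sol w =>
    -- buckets = {p: [] for p in range(1, P+1)}
    let buckets0 := (PySem.List.pyRange 1 (P + 1) 1).foldl
      (fun d p => d.insert p ([] : List Int)) (PySem.Dict.empty)
    -- for t in range(N): buckets[Per[t][w]].append(t)   (KeyError excluded by Pre_)
    let buckets := (PySem.List.pyRange 0 N 1).foldl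
      (fun d t => d.modify (((Per.getD t.toNat []).getD w.toNat 0)) [] (fun l => l ++ [t])) buckets0
    (PySem.List.pyRange 1 (P + 1) 1).foldl (fun sol p =>
      let teams := buckets.getD p []
      if teams.length ≠ 2 then sol   -- Python raises ValueError here; excluded by Pre_
      else
        -- a, b = teams
        let a := PySem.List.pyGetD teams 0 0
        let b := PySem.List.pyGetD teams 1 0
        let ha := ((Home.getD a.toNat []).getD w.toNat false)
        let hb := ((Home.getD b.toNat []).getD w.toNat false)
        if ha && !hb then pvSetCell sol p w [a + 1, b + 1]
        else if hb && !ha then pvSetCell sol p w [b + 1, a + 1]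
        else pvSetCell sol p w [a + 1, b + 1]) sol) sol0

-- ===== PORT B =====
-- cell(w, p) of Source B
def pvCellB (Per : List (List Int)) (Home : List (List Bool)) (N : Int) (w p : Int) : List Int :=
  let teams := (PySem.List.pyRange 0 N 1).filter (fun t => ((Per.getD t.toNat []).getD w.toNat 0) == p)
  if teams.length ≠ 2 then []   -- Python raises ValueError here; excluded by Pre_
  else
    -- a, b = teams
    let a := PySem.List.pyGetD teams 0 0
    let b := PySem.List.pyGetD teams 1 0
    if ((Home.getD b.toNat []).getD w.toNat false) && !((Home.getD a.toNat []).getD w.toNat false) then [b + 1, a + 1]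
    else [a + 1, b + 1]

def build_solution_table_alt (Per : List (List Int)) (Home : List (List Bool)) (N : Int) (W : Int) (P : Int) : List (List (List Int)) :=
  (PySem.List.pyRange 1 (P + 1) 1).map (fun p =>
    (PySem.List.pyRange 0 W 1).map (fun w => pvCellB Per Home N w p))

-- ===== PRECONDITION & SPEC =====
-- Pre_ = exactly the inputs on which Python A returns: every accessed index in range,
-- every Per[t][w] a valid period 1..P, and each (week, period) holding exactly 2 teams
-- (otherwise A raises IndexError / KeyError / ValueError).  The per-period count is
-- stated per TEAM (each team's period value occurs exactly twice that week) together
-- with N = 2*P, which is equivalent and keeps the predicate cheap to decide.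
def Pre_build_solution_table (Per : List (List Int)) (Home : List (List Bool)) (N : Int) (W : Int) (P : Int) : Prop :=
  0 < W →
    N ≤ (Per.length : Int) ∧ N ≤ (Home.length : Int) ∧ (N = 2 * P ∨ (N ≤ 0 ∧ P ≤ 0)) ∧
    ∀ t ∈ PySem.List.pyRange 0 N 1,
      W ≤ ((Per.getD t.toNat []).length : Int) ∧ W ≤ ((Home.getD t.toNat []).length : Int) ∧
      ∀ w ∈ PySem.List.pyRange 0 W 1,
        1 ≤ (Per.getD t.toNat []).getD w.toNat 0 ∧ (Per.getD t.toNat []).getD w.toNat 0 ≤ P ∧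
        ((PySem.List.pyRange 0 N 1).filter (fun s =>
          (Per.getD s.toNat []).getD w.toNat 0 == (Per.getD t.toNat []).getD w.toNat 0)).length = 2
instance (Per : List (List Int)) (Home : List (List Bool)) (N : Int) (W : Int) (P : Int) : Decidable (Pre_build_solution_table Per Home N W P) := by unfold Pre_build_solution_table; infer_instance

def pvWitness_build_solution_table : List (List Int) × List (List Bool) × Int × Int × Int :=
  ([[1], [1]], [[true], [false]], 2, 1, 1)

def Spec_build_solution_table (Per : List (List Int)) (Home : List (List Bool)) (N : Int) (W : Int) (P : Int) (out : List (List (List Int))) : Prop := out = build_solution_table_alt Per Home N W P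
instance (Per : List (List Int)) (Home : List (List Bool)) (N : Int) (W : Int) (P : Int) (out : List (List (List Int))) : Decidable (Spec_build_solution_table Per Home N W P out) := by unfold Spec_build_solution_table; infer_instance

-- ===== CLAIM (what is proved, stated in full; the proofs are below) =====
def Claim_equal_build_solution_table : Prop := ∀ (Per : List (List Int)) (Home : List (List Bool)) (N : Int) (W : Int) (P : Int), Dom_build_solution_table Per Home N W P → Pre_build_solution_table Per Home N W P → Spec_build_solution_table Per Home N W P (build_solution_table Per Home N W P)

-- ===== LEMMAS AND PROOFS =====

-- every value occurring exactly twice within [1,P] and N = 2*P forces every p in [1,P]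
-- to occur exactly twice (pigeonhole)
lemma pv_pigeonhole (f : Int → Int) (N P p : Int) (hp1 : 1 ≤ p) (hp2 : p ≤ P) (hNP : N = 2 * P)
    (h : ∀ t ∈ PySem.List.pyRange 0 N 1, 1 ≤ f t ∧ f t ≤ P ∧
      ((PySem.List.pyRange 0 N 1).filter (fun s => f s == f t)).length = 2) :
    ((PySem.List.pyRange 0 N 1).filter (fun s => f s == p)).length = 2 := by
  set l := (PySem.List.pyRange 0 N 1).map f with hl
  have hcount : ∀ x, l.count x = ((PySem.List.pyRange 0 N 1).filter (fun s => f s == x)).length := by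
    intro x
    rw [List.count, List.countP_map, List.countP_eq_length_filter]
    rfl
  have hcnt : ∀ x ∈ l, l.count x = 2 ∧ 1 ≤ x ∧ x ≤ P := by
    intro x hx
    obtain ⟨t, ht, rfl⟩ := List.mem_map.mp hx
    obtain ⟨h1, h2, h3⟩ := h t ht
    exact ⟨(hcount (f t)).trans h3, h1, h2⟩
  have hlen : l.length = (2 * P).toNat := by
    rw [hl, List.length_map, PySem.List.length_pyRange_one]
    omega
  have hsub : l.toFinset ⊆ Finset.Icc (1 : Int) P := by
    intro x hx
    rw [List.mem_toFinset] at hx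
    exact Finset.mem_Icc.mpr ⟨(hcnt x hx).2.1, (hcnt x hx).2.2⟩
  have hsum : ∑ x ∈ l.toFinset, l.count x = l.length := List.sum_toFinset_count_eq_length l
  have hsum2 : ∑ x ∈ l.toFinset, l.count x = 2 * l.toFinset.card := by
    rw [Finset.sum_congr rfl (fun x hx => (hcnt x (List.mem_toFinset.mp hx)).1)]
    simp [Finset.sum_const, Nat.mul_comm]
  have hIcc : (Finset.Icc (1 : Int) P).card = P.toNat := by
    rw [Int.card_Icc]; omega
  have hcard : l.toFinset.card = P.toNat := by omega
  have hSeq : l.toFinset = Finset.Icc (1 : Int) P :=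
    Finset.eq_of_subset_of_card_le hsub (by omega)
  have hpmem : p ∈ l := List.mem_toFinset.mp (hSeq ▸ Finset.mem_Icc.mpr ⟨hp1, hp2⟩)
  rw [← hcount p]
  exact (hcnt p hpmem).1


-- the comprehension {p: [] for p in range(1,P+1)} looks up to [] everywhere
lemma pv_getD_init (l : List Int) (d : PySem.Dict Int (List Int)) (c : Int)
    (h : d.getD c [] = []) :
    (l.foldl (fun d p => d.insert p ([] : List Int)) d).getD c [] = [] := by
  induction l generalizing d with
  | nil => exact h
  | cons x xs ih =>
    refine ih _ ?_
    rw [PySem.Dict.getD_insert]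
    split <;> [rfl; exact h]

-- A's bucket for period p is exactly B's filtered team list
lemma pv_teams (Per : List (List Int)) (N w p : Int) (b0 : PySem.Dict Int (List Int))
    (h : b0.getD p [] = []) :
    ((PySem.List.pyRange 0 N 1).foldl
        (fun d t => d.modify (((Per.getD t.toNat []).getD w.toNat 0)) [] (fun l => l ++ [t])) b0).getD p []
      = (PySem.List.pyRange 0 N 1).filter (fun t => ((Per.getD t.toNat []).getD w.toNat 0) == p) := by
  have hm : ((PySem.List.pyRange 0 N 1).foldl
        (fun d t => d.modify (((Per.getD t.toNat []).getD w.toNat 0)) [] (fun l => l ++ [t])) b0)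
      = ((PySem.List.pyRange 0 N 1).map (fun t => (((Per.getD t.toNat []).getD w.toNat 0), t))).foldl
          (fun (d : PySem.Dict Int (List Int)) (q : Int × Int) => d.modify q.1 [] (fun l => l ++ [q.2])) b0 := by
    rw [List.foldl_map]
  rw [hm]
  rw [PySem.Dict.getD_foldl_modify_append, h, List.filter_map, List.map_map]
  simp [Function.comp_def]

-- writing into position p-a of a range-comprehension table updates the function pointwise
lemma pv_set_map {α : Type} (a b p : Int) (f : Int → α) (v : α) (h1 : a ≤ p) (h2 : p < b) :
    ((PySem.List.pyRange a b 1).map f).set (p - a).toNat v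
      = (PySem.List.pyRange a b 1).map (fun q => if q = p then v else f q) := by
  apply List.ext_getElem (by simp)
  intro k hk1 hk2
  have hk : k < (b - a).toNat := by simpa [PySem.List.length_pyRange_one] using hk2
  simp only [List.getElem_set, List.getElem_map, PySem.List.getElem_pyRange_one]
  by_cases hkp : a + (k : Int) = p
  · rw [if_pos (by omega), if_pos hkp]
  · rw [if_neg (by omega), if_neg hkp]

-- the inner per-period fold updates every row of the table at column w
lemma pv_inner (w : Int) (g : Int → List Int) (P : Int) :
    ∀ (n : Nat) (a : Int) (rows : Int → List (List Int)), 1 ≤ a → (P + 1 - a).toNat = n →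
    (PySem.List.pyRange a (P + 1) 1).foldl (fun sol p => pvSetCell sol p w (g p))
        ((PySem.List.pyRange 1 (P + 1) 1).map rows)
      = (PySem.List.pyRange 1 (P + 1) 1).map
          (fun p => if a ≤ p then PySem.List.pySetD (rows p) w (g p) else rows p) := by
  intro n
  induction n with
  | zero =>
    intro a rows ha hn
    rw [show PySem.List.pyRange a (P + 1) 1 = [] from PySem.List.pyRange_one_eq_nil (by omega), List.foldl_nil]
    apply List.map_congr_left
    intro p hp
    rw [PySem.List.mem_pyRange_one] at hp
    rw [if_neg (by omega)]
  | succ m ih =>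
    intro a rows ha hn
    have hab : a < P + 1 := by omega
    rw [PySem.List.pyRange_one_cons hab, List.foldl_cons]
    have hget : PySem.List.pyGetD ((PySem.List.pyRange 1 (P + 1) 1).map rows) (a - 1) [] = rows a := by
      rw [show (a - 1) = (((a - 1).toNat : Nat) : Int) from by omega,
        PySem.List.pyGetD_map_pyRange_one rows 1 (P + 1) (a - 1).toNat [] (by omega)]
      congr 1
      omega
    have hset : pvSetCell ((PySem.List.pyRange 1 (P + 1) 1).map rows) a w (g a)
        = (PySem.List.pyRange 1 (P + 1) 1).map
            (fun q => if q = a then PySem.List.pySetD (rows a) w (g a) else rows q) := by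
      unfold pvSetCell
      rw [hget, PySem.List.pySetD_of_nonneg _ _ (by omega : (0:Int) ≤ a - 1)]
      exact pv_set_map 1 (P + 1) a rows _ (by omega) (by omega)
    rw [hset, ih (a + 1) _ (by omega) (by omega)]
    apply List.map_congr_left
    intro p hp
    rw [PySem.List.mem_pyRange_one] at hp
    by_cases h1 : p = a
    · subst h1
      rw [if_neg (by omega), if_pos le_rfl, if_pos rfl]
    · by_cases h2 : a + 1 ≤ p
      · rw [if_pos h2, if_neg h1, if_pos (by omega)]
      · rw [if_neg h2, if_neg h1, if_neg (by omega)]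

-- the week loop of per-row writes distributes over the rows
lemma pv_outer (P : Int) (g : Int → Int → List Int) :
    ∀ (ws : List Int) (rows : Int → List (List Int)),
    ws.foldl (fun sol w =>
        (PySem.List.pyRange 1 (P + 1) 1).foldl (fun sol p => pvSetCell sol p w (g w p)) sol)
        ((PySem.List.pyRange 1 (P + 1) 1).map rows)
      = (PySem.List.pyRange 1 (P + 1) 1).map
          (fun p => ws.foldl (fun row w => PySem.List.pySetD row w (g w p)) (rows p)) := by
  intro ws
  induction ws with
  | nil => intro rows; simp
  | cons w ws ih =>
    intro rows
    rw [List.foldl_cons]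
    have h1 : (PySem.List.pyRange 1 (P + 1) 1).foldl (fun sol p => pvSetCell sol p w (g w p))
          ((PySem.List.pyRange 1 (P + 1) 1).map rows)
        = (PySem.List.pyRange 1 (P + 1) 1).map
            (fun p => PySem.List.pySetD (rows p) w (g w p)) := by
      rw [pv_inner w (g w) P (P + 1 - 1).toNat 1 rows le_rfl rfl]
      apply List.map_congr_left
      intro p hp
      rw [PySem.List.mem_pyRange_one] at hp
      rw [if_pos (by omega)]
    rw [h1, ih]
    simp only [List.foldl_cons]

-- filling every in-range column of a range-comprehension row realises the comprehension
lemma pv_row (g : Int → List Int) (W : Int) :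
    ∀ (ws : List Int) (rowf : Int → List Int), (∀ w ∈ ws, 0 ≤ w ∧ w < W) →
    ws.foldl (fun r w => PySem.List.pySetD r w (g w)) ((PySem.List.pyRange 0 W 1).map rowf)
      = (PySem.List.pyRange 0 W 1).map (fun u => if u ∈ ws then g u else rowf u) := by
  intro ws
  induction ws with
  | nil => intro rowf h; simp
  | cons w ws ih =>
    intro rowf h
    have hw := h w (by simp)
    rw [List.foldl_cons]
    have hset : PySem.List.pySetD ((PySem.List.pyRange 0 W 1).map rowf) w (g w)
        = (PySem.List.pyRange 0 W 1).map (fun q => if q = w then g w else rowf q) := by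
      rw [PySem.List.pySetD_of_nonneg _ _ hw.1,
        show w.toNat = (w - 0).toNat from by omega]
      exact pv_set_map 0 W w rowf (g w) hw.1 hw.2
    rw [hset, ih _ (fun x hx => h x (by simp [hx]))]
    apply List.map_congr_left
    intro u hu
    by_cases h1 : u = w <;> by_cases h2 : u ∈ ws <;> simp [h1, h2]

-- ===== VERDICT (by name: the statement is the Claim_ definition above) =====
theorem build_solution_table_spec : Claim_equal_build_solution_table := by
  intro Per Home N W P _ hpre
  have hcount : ∀ w ∈ PySem.List.pyRange 0 W 1, ∀ p ∈ PySem.List.pyRange 1 (P + 1) 1,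
      ((PySem.List.pyRange 0 N 1).filter (fun t => (Per.getD t.toNat []).getD w.toNat 0 == p)).length = 2 := by
    intro w hw p hp
    rw [PySem.List.mem_pyRange_one] at hw hp
    obtain ⟨_, _, hNP, hT⟩ := hpre (by omega)
    have hNP' : N = 2 * P := by
      rcases hNP with h | h
      · exact h
      · omega
    refine pv_pigeonhole (fun t => (Per.getD t.toNat []).getD w.toNat 0) N P p (by omega) (by omega) hNP' ?_
    intro t ht
    obtain ⟨_, _, hW⟩ := hT t ht
    exact hW w (PySem.List.mem_pyRange_one.mpr ⟨hw.1, hw.2⟩)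
  show build_solution_table Per Home N W P = build_solution_table_alt Per Home N W P
  simp only [build_solution_table, build_solution_table_alt]
  have hsol0 : (PySem.List.pyRange 0 P 1).map (fun _ => (PySem.List.pyRange 0 W 1).map (fun _ => ([] : List Int)))
      = (PySem.List.pyRange 1 (P + 1) 1).map (fun _ => (PySem.List.pyRange 0 W 1).map (fun _ => ([] : List Int))) := by
    rw [PySem.List.pyRange_one 0 P, PySem.List.pyRange_one 1 (P + 1), List.map_map, List.map_map]
    norm_num
  rw [hsol0]
  -- replace A's week body by the canonical per-cell writes with B's cell values
  rw [PySem.List.foldl_congr_mem _ _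
      (fun sol w => (PySem.List.pyRange 1 (P + 1) 1).foldl
        (fun sol p => pvSetCell sol p w (pvCellB Per Home N w p)) sol) _ ?_]
  · rw [pv_outer P (fun w p => pvCellB Per Home N w p) (PySem.List.pyRange 0 W 1)]
    apply List.map_congr_left
    intro p hp
    rw [pv_row (fun w => pvCellB Per Home N w p) W (PySem.List.pyRange 0 W 1)
        (fun _ => ([] : List Int)) (by intro w hw; rw [PySem.List.mem_pyRange_one] at hw; omega)]
    apply List.map_congr_left
    intro u hu
    rw [if_pos hu]
  · intro sol w hw
    apply PySem.List.foldl_congr_mem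
    intro acc p hp
    have hteams : ((PySem.List.pyRange 0 N 1).foldl
          (fun d t => d.modify (((Per.getD t.toNat []).getD w.toNat 0)) [] (fun l => l ++ [t]))
          ((PySem.List.pyRange 1 (P + 1) 1).foldl
            (fun d p => d.insert p ([] : List Int)) PySem.Dict.empty)).getD p []
        = (PySem.List.pyRange 0 N 1).filter (fun t => ((Per.getD t.toNat []).getD w.toNat 0) == p) :=
      pv_teams Per N w p _ (pv_getD_init _ _ _ (by rw [PySem.Dict.getD_empty]))
    have hlen := hcount w hw p hp
    obtain ⟨a, b, hab⟩ := List.length_eq_two.mp hlen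
    simp only [hteams, hab, pvCellB]
    norm_num [PySem.List.pyGetD]
    by_cases h1 : (Home[a.toNat]?.getD [])[w.toNat]?.getD false = true <;>
      by_cases h2 : (Home[b.toNat]?.getD [])[w.toNat]?.getD false = true <;>
      simp [h1, h2]
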